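-- pv_equiv track=rewrite | github.com/velric-ai/velric | pages/testt.py | findMinGeneration
-- ===== SOURCE A (Python) =====
-- def findMinGeneration(layer):
--     generation = 0
--     layer = layer[1:]
--     n = len(layer)
--
--     if n == 0:
--         return 0
--
--     while True:
--         maximum = max(layer)
--
--         if all(x == maximum for x in layer):
--             return generation
--
--         generation = generation + 1
--
--         if generation % 2 == 1:
--             best = -1
--             for i in range(n):
--                 if layer[i] + 1 == maximum or maximum - (layer[i] + 1) >= 2:
--                     best = i
--                     break
--             if best != -1:
--                 layer[best] += 1
--
--         else:
--             best = -1
--             for i in range(n):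
--                 new_val = layer[i] + 2
--                 if new_val == maximum or maximum - new_val >= 1:
--                     best = i
--                     break
--             if best != -1:
--                 layer[best] += 2
-- ===== SOURCE B (Python) =====
-- def findMinGeneration(layer):
--     # Max is invariant, so work with deficits d[i] = max - layer[i+1].
--     # A resolves the leftmost nonzero deficit; its trajectory is forced
--     # (odd generation -1, even generation -2) except in two terminal states
--     # ((2, odd) and (1, even)), where exactly one "event" occurs: the
--     # generation either decrements the first eligible later element or is
--     # skipped, and in both cases the element finishes two generations later.
--     # So each element's generation cost is a closed form of its value and the
--     # parity it starts at; one left-to-right pass (plus one bounded side-effect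
--     # scan per event) replaces A's generation-by-generation global simulation.
--     rest = layer[1:]
--     if not rest:
--         return 0
--     m = max(rest)
--     d = [m - x for x in rest]
--     g = 0
--     for i in range(len(d)):
--         v = d[i]
--         if v == 0:
--             continue
--         if g % 2 == 0:  # next generation is odd
--             if v == 1:
--                 gens, event = 1, None
--             elif v == 2:
--                 gens, event = 2, 'odd'
--             elif v % 3 == 0:
--                 gens, event = 2 * v // 3, None
--             elif v % 3 == 1:
--                 gens, event = 2 * (v - 1) // 3 + 1, None
--             else:
--                 gens, event = 2 * (v - 2) // 3 + 2, 'odd'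
--         else:  # next generation is even
--             if v == 1:
--                 gens, event = 2, 'even'
--             elif v % 3 == 2:
--                 gens, event = 2 * (v - 2) // 3 + 1, None
--             elif v % 3 == 0:
--                 gens, event = 2 * v // 3, None
--             else:
--                 gens, event = 2 * (v - 4) // 3 + 3, 'odd'
--         if event == 'odd':
--             for j in range(i + 1, len(d)):
--                 if d[j] == 1 or d[j] >= 3:
--                     d[j] -= 1
--                     break
--         elif event == 'even':
--             for j in range(i + 1, len(d)):
--                 if d[j] >= 2:
--                     d[j] -= 2
--                     break
--         g += gens
--     return g
-- ===== Notes on version B (the rewrite author's own statement) =====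
-- stated objective: faster
-- what changed: B replaces A's generation-by-generation simulation by a single left-to-right pass over the deficit array: each element's generation count is a closed form (mod-3 arithmetic) of its deficit and starting parity, with at most one bounded side-effect scan per element, instead of A's per-generation max/all/search scans repeated for every generation.
import Mathlib
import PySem

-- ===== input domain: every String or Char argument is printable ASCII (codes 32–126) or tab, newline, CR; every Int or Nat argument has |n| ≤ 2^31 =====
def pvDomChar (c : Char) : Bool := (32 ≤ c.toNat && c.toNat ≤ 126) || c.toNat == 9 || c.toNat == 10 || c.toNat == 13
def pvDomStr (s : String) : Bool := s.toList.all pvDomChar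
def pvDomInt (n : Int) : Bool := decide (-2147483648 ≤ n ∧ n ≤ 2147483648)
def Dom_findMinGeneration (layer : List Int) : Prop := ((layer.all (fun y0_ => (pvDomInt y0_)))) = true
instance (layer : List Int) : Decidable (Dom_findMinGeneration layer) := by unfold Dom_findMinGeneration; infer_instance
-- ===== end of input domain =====

-- B replaces A's generation-by-generation simulation by one left-to-right pass over the
-- deficit array (max is invariant): each element's generation cost is a closed form of
-- its deficit and starting parity, plus at most one bounded side-effect scan per element.

-- ===== PORT A =====
-- 'for i in range(n): if cond: best = i; break' followed by 'layer[best] += k':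
-- find the first element satisfying A's condition and bump it (none = best stays -1).
def pvFindFirst (c : Int → Bool) (u : Int → Int) : List Int → Option (List Int)
  | [] => none
  | x :: xs => if c x then some (u x :: xs) else (pvFindFirst c u xs).map (x :: ·)

-- 'while True': fuel-totalised loop (3*S+3 steps always suffice; fuel is a guard only).
def pvLoopA : Nat → List Int → Int → Int
  | 0, _, g => g
  | f+1, L, g =>
    let m := (PySem.List.max? L (fun x => x)).getD 0
    if L.all (fun x => x == m) then g
    else
      let g1 := g + 1
      if g1 % 2 == 1 then
        pvLoopA f ((pvFindFirst (fun x => decide (x + 1 = m ∨ m - (x + 1) ≥ 2)) (fun x => x + 1) L).getD L) g1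
      else
        pvLoopA f ((pvFindFirst (fun x => decide (x + 2 = m ∨ m - (x + 2) ≥ 1)) (fun x => x + 2) L).getD L) g1

def findMinGeneration (layer : List Int) : Int :=
  let L := PySem.List.slice layer (some 1) none
  if L.length = 0 then 0
  else
    let m := (PySem.List.max? L (fun x => x)).getD 0
    pvLoopA (3 * (L.map (fun x => m - x)).sum + 3).toNat L 0

-- ===== PORT B =====
-- Source B's closed form for (gens, event) when the element starts at an odd generation;
-- event: none = None, some true = 'odd' (side -1), some false = 'even' (side -2).
def pvGensOdd (v : Int) : Int × Option Bool :=
  if v == 1 then (1, none)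
  else if v == 2 then (2, some true)
  else if PySem.Int.mod v 3 == 0 then (PySem.Int.floordiv (2 * v) 3, none)
  else if PySem.Int.mod v 3 == 1 then (PySem.Int.floordiv (2 * (v - 1)) 3 + 1, none)
  else (PySem.Int.floordiv (2 * (v - 2)) 3 + 2, some true)

-- Source B's closed form when the element starts at an even generation.
def pvGensEven (v : Int) : Int × Option Bool :=
  if v == 1 then (2, some false)
  else if PySem.Int.mod v 3 == 2 then (PySem.Int.floordiv (2 * (v - 2)) 3 + 1, none)
  else if PySem.Int.mod v 3 == 0 then (PySem.Int.floordiv (2 * v) 3, none)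
  else (PySem.Int.floordiv (2 * (v - 4)) 3 + 3, some true)

-- "for j in range(i+1,...): if d[j]==1 or d[j]>=3: d[j]-=1; break" on the tail.
def pvSideOdd : List Int → List Int
  | [] => []
  | x :: xs => if x == 1 || x ≥ 3 then (x - 1) :: xs else x :: pvSideOdd xs

-- the same for the even event: first d[j] >= 2 gets -2.
def pvSideEven : List Int → List Int
  | [] => []
  | x :: xs => if x ≥ 2 then (x - 2) :: xs else x :: pvSideEven xs

def pvApplyEvent : Option Bool → List Int → List Int
  | none, r => r
  | some true, r => pvSideOdd r
  | some false, r => pvSideEven r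

-- (used by pvPassB's termination: an event never changes the list's length)
lemma pvSideOdd_length (r : List Int) : (pvSideOdd r).length = r.length := by
  induction r with
  | nil => rfl
  | cons x xs ih => by_cases hx : (x == 1 || x ≥ 3) = true <;> simp [pvSideOdd, hx, ih]

lemma pvSideEven_length (r : List Int) : (pvSideEven r).length = r.length := by
  induction r with
  | nil => rfl
  | cons x xs ih => by_cases hx : x ≥ 2 <;> simp [pvSideEven, hx, ih]

lemma pvApplyEvent_length (e : Option Bool) (r : List Int) : (pvApplyEvent e r).length = r.length := by
  cases e with
  | none => rfl
  | some b => cases b <;> simp [pvApplyEvent, pvSideOdd_length, pvSideEven_length]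

-- the 'for i in range(len(d))' pass: only the tail after i is ever mutated,
-- so the loop is structural recursion on the list.
def pvPassB : List Int → Int → Int
  | [], g => g
  | v :: rest, g =>
    if v == 0 then pvPassB rest g
    else
      let ge := if PySem.Int.mod g 2 == 0 then pvGensOdd v else pvGensEven v
      pvPassB (pvApplyEvent ge.2 rest) (g + ge.1)
termination_by d _ => d.length
decreasing_by all_goals simp only [pvApplyEvent_length, List.length_cons]; omega

def findMinGeneration_alt (layer : List Int) : Int :=
  let rest := PySem.List.slice layer (some 1) none
  -- 'if not rest: return 0' and 'm = max(rest)': max? is none exactly on the empty list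
  match PySem.List.max? rest (fun x => x) with
  | none => 0
  | some m => pvPassB (rest.map (fun x => m - x)) 0

-- ===== PRECONDITION & SPEC =====
def Spec_findMinGeneration (layer : List Int) (out : Int) : Prop := out = findMinGeneration_alt layer
instance (layer : List Int) (out : Int) : Decidable (Spec_findMinGeneration layer out) := by unfold Spec_findMinGeneration; infer_instance

-- ===== CLAIM (what is proved, stated in full; the proofs are below) =====
def Claim_equal_findMinGeneration : Prop := ∀ (layer : List Int), Dom_findMinGeneration layer → Spec_findMinGeneration layer (findMinGeneration layer)

-- ===== LEMMAS AND PROOFS =====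

-- proof-side intermediate: A's loop transported to deficit space (d[i] = m - layer[i]).
def pvScan (p : Int → Bool) : List Int → Option Nat
  | [] => none
  | x :: xs => if p x then some 0 else (pvScan p xs).map (· + 1)

def pvLoopD : Nat → List Int → Int → Int
  | 0, _, g => g
  | f+1, d, g =>
    if d.all (fun x => x == 0) then g
    else
      let g1 := g + 1
      if g1 % 2 == 1 then
        match pvScan (fun x => decide (x = 1 ∨ x ≥ 3)) d with
        | some j => pvLoopD f (d.set j (d.getD j 0 - 1)) g1
        | none => pvLoopD f d g1
      else
        match pvScan (fun x => decide (x ≥ 2)) d with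
        | some j => pvLoopD f (d.set j (d.getD j 0 - 2)) g1
        | none => pvLoopD f d g1

lemma pv_max_getD (L : List Int) (m : Int) (hb : ∀ x ∈ L, x ≤ m) (hm : m ∈ L) :
    (PySem.List.max? L (fun x => x)).getD 0 = m := by
  cases hq : PySem.List.max? L (fun x => x) with
  | none =>
    rw [PySem.List.max?_eq_none_iff] at hq
    subst hq; simp at hm
  | some v =>
    have hv : v ∈ L := PySem.List.max?_mem hq
    have h1 : v ≤ m := hb v hv
    have h2 : m ≤ v := PySem.List.max?_isMax hq m hm
    simp; omega

lemma pv_scan_some (p : Int → Bool) : ∀ (l : List Int) (j : Nat), pvScan p l = some j →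
    ∃ h : j < l.length, p l[j] = true := by
  intro l
  induction l with
  | nil => intro j h; simp [pvScan] at h
  | cons x xs ih =>
    intro j h
    by_cases hx : p x = true
    · simp [pvScan, hx] at h
      subst h; exact ⟨by simp, by simpa using hx⟩
    · simp [pvScan, hx] at h
      obtain ⟨j', hj', rfl⟩ := h
      obtain ⟨hlt, hp⟩ := ih j' hj'
      exact ⟨by simpa using Nat.succ_lt_succ hlt, by simpa using hp⟩

lemma pv_scan_cons (p : Int → Bool) (x : Int) (xs : List Int) :
    pvScan p (x :: xs) = if p x then some 0 else (pvScan p xs).map (· + 1) := rfl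

lemma pv_find_scan (c : Int → Bool) (u : Int → Int) (p : Int → Bool) (m : Int)
    (hcp : ∀ x, c x = p (m - x)) :
    ∀ L : List Int, pvFindFirst c u L =
      (pvScan p (L.map (fun x => m - x))).map (fun j => L.set j (u (L.getD j 0))) := by
  intro L
  induction L with
  | nil => simp [pvFindFirst, pvScan]
  | cons x xs ih =>
    by_cases hx : p (m - x) = true
    · simp [pvFindFirst, pvScan, hcp x, hx]
    · simp only [pvFindFirst, pvScan, List.map_cons, hcp x, hx, Bool.false_eq_true, if_false]
      rw [ih]
      cases pvScan p (xs.map (fun x => m - x)) <;> simp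

lemma pv_all_map_zero (m : Int) (L : List Int) :
    (L.all (fun x => x == m)) = ((L.map (fun x => m - x)).all (fun x => x == 0)) := by
  induction L with
  | nil => rfl
  | cons x xs ih =>
    simp only [List.all_cons, List.map_cons, ih]
    congr 1
    by_cases h : x = m
    · simp [h]
    · have h2 : m - x ≠ 0 := by omega
      simp [h, h2]

lemma pv_branch_sim (m δ : Int) (p : Int → Bool) (c : Int → Bool)
    (hcp : ∀ x, c x = p (m - x))
    (hpd : ∀ x : Int, p x = true → δ ≤ x) (hδ : 1 ≤ δ)
    (L : List Int) (hb : ∀ x ∈ L, x ≤ m) (hm : m ∈ L) :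
    (pvScan p (L.map (fun x => m - x)) = none ∧
       pvFindFirst c (fun x => x + δ) L = none) ∨
    (∃ j, pvScan p (L.map (fun x => m - x)) = some j ∧
       pvFindFirst c (fun x => x + δ) L = some (L.set j (L.getD j 0 + δ)) ∧
       (L.set j (L.getD j 0 + δ)).map (fun x => m - x)
         = (L.map (fun x => m - x)).set j ((L.map (fun x => m - x)).getD j 0 - δ) ∧
       (∀ x ∈ L.set j (L.getD j 0 + δ), x ≤ m) ∧
       m ∈ L.set j (L.getD j 0 + δ)) := by
  have hfind := pv_find_scan c (fun x => x + δ) p m hcp L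
  cases hscan : pvScan p (L.map (fun x => m - x)) with
  | none =>
    left
    refine ⟨rfl, ?_⟩
    rw [hfind, hscan]; rfl
  | some j =>
    right
    obtain ⟨hlt, hp⟩ := pv_scan_some p _ _ hscan
    have hlenL : j < L.length := by simpa using hlt
    have hdval : (L.map (fun x => m - x))[j]'hlt = m - L[j]'hlenL := by simp
    have hdgetD : (L.map (fun x => m - x)).getD j 0 = m - L[j]'hlenL := by
      rw [List.getD_eq_getElem _ _ hlt, hdval]
    have hLgetD : L.getD j 0 = L[j]'hlenL := List.getD_eq_getElem _ _ hlenL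
    have helig : δ ≤ m - L[j]'hlenL := by
      apply hpd; rw [← hdval]; exact hp
    refine ⟨j, rfl, ?_, ?_, ?_, ?_⟩
    · rw [hfind, hscan]; rfl
    · rw [List.map_set]
      congr 1
      rw [hdgetD, hLgetD]; ring
    · intro x hx
      rcases List.mem_or_eq_of_mem_set hx with h | rfl
      · exact hb x h
      · rw [hLgetD]; omega
    · obtain ⟨i, hi, hLi⟩ := List.mem_iff_getElem.mp hm
      have hne : i ≠ j := by
        intro h; subst h; omega
      refine List.mem_iff_getElem.mpr ⟨i, by simpa using hi, ?_⟩
      rw [List.getElem_set_ne (Ne.symm hne)]; exact hLi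

-- Phase 1: A's loop equals the deficit-space loop.
lemma pv_loop_AD (m : Int) : ∀ (f : Nat) (L : List Int) (g : Int),
    (∀ x ∈ L, x ≤ m) → m ∈ L →
    pvLoopA f L g = pvLoopD f (L.map (fun x => m - x)) g := by
  intro f
  induction f with
  | zero => intro L g _ _; rfl
  | succ f ih =>
    intro L g hb hm
    have hmax : (PySem.List.max? L (fun x => x)).getD 0 = m := pv_max_getD L m hb hm
    by_cases hall : L.all (fun x => x == m) = true
    · have hallD : ((L.map (fun x => m - x)).all (fun x => x == 0)) = true := by
        rw [← pv_all_map_zero]; exact hall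
      simp [pvLoopA, pvLoopD, hmax, hall, hallD]
    · have hallD : ¬ ((L.map (fun x => m - x)).all (fun x => x == 0)) = true := by
        rw [← pv_all_map_zero]; exact hall
      simp only [pvLoopA, pvLoopD, hmax]
      rw [if_neg hall, if_neg hallD]
      cases hpar : ((g + 1) % 2 == 1) with
      | true =>
        simp only [if_true]
        rcases pv_branch_sim m 1 (fun x => decide (x = 1 ∨ x ≥ 3))
            (fun x => decide (x + 1 = m ∨ m - (x + 1) ≥ 2))
            (fun x => decide_eq_decide.mpr (by omega))
            (fun x hx => by simpa using (by simpa using hx : x = 1 ∨ x ≥ 3).elim (by omega) (by omega))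
            (by norm_num) L hb hm with ⟨hscan, hfind⟩ | ⟨j, hscan, hfind, hmap, hb', hm'⟩
        · rw [hscan, hfind]
          exact ih L (g + 1) hb hm
        · rw [hscan, hfind]
          have := ih _ (g + 1) hb' hm'
          rw [hmap] at this
          simpa using this
      | false =>
        simp only [Bool.false_eq_true, if_false]
        rcases pv_branch_sim m 2 (fun x => decide (x ≥ 2))
            (fun x => decide (x + 2 = m ∨ m - (x + 2) ≥ 1))
            (fun x => decide_eq_decide.mpr (by omega))
            (fun x hx => by simpa using hx)
            (by norm_num) L hb hm with ⟨hscan, hfind⟩ | ⟨j, hscan, hfind, hmap, hb', hm'⟩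
        · rw [hscan, hfind]
          exact ih L (g + 1) hb hm
        · rw [hscan, hfind]
          have := ih _ (g + 1) hb' hm'
          rw [hmap] at this
          simpa using this

-- Closed-form recurrences for pvGensOdd / pvGensEven.
lemma pv_gens_odd_one : pvGensOdd 1 = (1, none) := by decide
lemma pv_gens_odd_two : pvGensOdd 2 = (2, some true) := by decide
lemma pv_gens_even_one : pvGensEven 1 = (2, some false) := by decide
lemma pv_gens_even_two : pvGensEven 2 = (1, none) := by decide

lemma pv_mod3 (v : Int) : PySem.Int.mod v 3 = v % 3 :=
  PySem.Int.mod_eq_emod_of_pos (by norm_num)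

lemma pv_div3 (v : Int) : PySem.Int.floordiv v 3 = v / 3 :=
  PySem.Int.floordiv_eq_ediv_of_pos (by norm_num)

lemma pv_gens_odd_step (v : Int) (h : 3 ≤ v) :
    pvGensOdd v = (1 + (pvGensEven (v - 1)).1, (pvGensEven (v - 1)).2) := by
  simp only [pvGensOdd, pvGensEven, pv_mod3, pv_div3, beq_iff_eq]
  split_ifs <;> (try rfl) <;> (try omega) <;> (refine Prod.ext ?_ rfl) <;> simp <;> omega

lemma pv_gens_even_step (v : Int) (h : 3 ≤ v) :
    pvGensEven v = (1 + (pvGensOdd (v - 2)).1, (pvGensOdd (v - 2)).2) := by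
  simp only [pvGensOdd, pvGensEven, pv_mod3, pv_div3, beq_iff_eq]
  split_ifs <;> (try rfl) <;> (try omega) <;> (refine Prod.ext ?_ rfl) <;> simp <;> omega

-- The side-effect helpers compute exactly scan-and-set.
lemma pv_side_odd_scan : ∀ rest : List Int,
    pvSideOdd rest = (match pvScan (fun x => decide (x = 1 ∨ x ≥ 3)) rest with
      | some j => rest.set j (rest.getD j 0 - 1)
      | none => rest) := by
  intro rest
  induction rest with
  | nil => rfl
  | cons x xs ih =>
    by_cases hx : x = 1 ∨ x ≥ 3
    · have hb : (x == 1 || x ≥ 3) = true := by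
        simp [beq_iff_eq]; omega
      simp [pvSideOdd, pvScan, hx, hb]
    · have hb : ¬ ((x == 1 || x ≥ 3) = true) := by
        simp [beq_iff_eq]; omega
      simp only [pvSideOdd, pvScan]
      rw [if_neg hb, if_neg (by simpa using hx)]
      rw [ih]
      cases pvScan (fun x => decide (x = 1 ∨ x ≥ 3)) xs <;> simp

lemma pv_side_even_scan : ∀ rest : List Int,
    pvSideEven rest = (match pvScan (fun x => decide (x ≥ 2)) rest with
      | some j => rest.set j (rest.getD j 0 - 2)
      | none => rest) := by
  intro rest
  induction rest with
  | nil => rfl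
  | cons x xs ih =>
    by_cases hx : x ≥ 2
    · simp [pvSideEven, pvScan, hx]
    · simp only [pvSideEven, pvScan, decide_eq_true_eq]
      rw [if_neg hx, if_neg hx, ih]
      cases pvScan (fun x => decide (x ≥ 2)) xs <;> simp

lemma pv_pass_zeros : ∀ (d : List Int), (∀ x ∈ d, x = 0) → ∀ g, pvPassB d g = g := by
  intro d
  induction d with
  | nil => intro _ g; simp [pvPassB]
  | cons x xs ih =>
    intro h g
    have hx : x = 0 := h x (by simp)
    subst hx
    rw [pvPassB, if_pos (by simp)]
    exact ih (fun y hy => h y (by simp [hy])) g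

lemma pv_loopD_zeros (f : Nat) (d : List Int) (g : Int) (h : d.all (fun x => x == 0) = true) :
    pvLoopD f d g = g := by
  cases f with
  | zero => rfl
  | succ f => simp [pvLoopD, h]

-- preservation facts used in the main induction
lemma pv_sum_nonneg' (d : List Int) (h0 : ∀ x ∈ d, 0 ≤ x) : 0 ≤ d.sum := by
  apply List.sum_nonneg; exact h0

lemma pv_sum_set_int : ∀ (l : List Int) (i : Nat), i < l.length →
    ∀ v, (l.set i v).sum = l.sum - l.getD i 0 + v := by
  intro l
  induction l with
  | nil => intro i h; simp at h
  | cons x xs ih =>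
    intro i h v
    cases i with
    | zero => simp [List.set]; ring
    | succ i' =>
      simp only [List.set, List.sum_cons, List.getD_cons_succ]
      rw [ih i' (by simpa using h) v]; ring

-- pvLoopD skips a zero head (a zero is never eligible in either parity).
lemma pv_loopD_cons_zero : ∀ (f : Nat) (d : List Int) (g : Int),
    pvLoopD f ((0 : Int) :: d) g = pvLoopD f d g := by
  intro f
  induction f with
  | zero => intro d g; rfl
  | succ f ih =>
    intro d g
    have hall : (((0:Int) :: d).all (fun x => x == 0)) = (d.all (fun x => x == 0)) := by simp
    by_cases hz : d.all (fun x => x == 0) = true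
    · rw [pv_loopD_zeros _ _ _ (by rw [hall]; exact hz), pv_loopD_zeros _ _ _ hz]
    · simp only [pvLoopD, hall]
      rw [if_neg hz, if_neg hz]
      have h1 : pvScan (fun x => decide (x = 1 ∨ x ≥ 3)) ((0:Int) :: d)
          = (pvScan (fun x => decide (x = 1 ∨ x ≥ 3)) d).map (· + 1) := by
        simp [pvScan]
      have h2 : pvScan (fun x => decide (x ≥ 2)) ((0:Int) :: d)
          = (pvScan (fun x => decide (x ≥ 2)) d).map (· + 1) := by
        simp [pvScan]
      rw [h1, h2]
      cases hp : ((g + 1) % 2 == 1) with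
      | true =>
        simp only [if_true]
        cases hs : pvScan (fun x => decide (x = 1 ∨ x ≥ 3)) d with
        | none => simpa using ih d (g + 1)
        | some j =>
          simp only [Option.map_some]
          have hset : ((0:Int) :: d).set (j+1) (((0:Int) :: d).getD (j+1) 0 - 1)
              = (0:Int) :: d.set j (d.getD j 0 - 1) := by
            simp [List.set, List.getD_cons_succ]
          rw [hset]
          exact ih _ (g + 1)
      | false =>
        simp only [Bool.false_eq_true, if_false]
        cases hs : pvScan (fun x => decide (x ≥ 2)) d with
        | none => simpa using ih d (g + 1)
        | some j =>
          simp only [Option.map_some]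
          have hset : ((0:Int) :: d).set (j+1) (((0:Int) :: d).getD (j+1) 0 - 2)
              = (0:Int) :: d.set j (d.getD j 0 - 2) := by
            simp [List.set, List.getD_cons_succ]
          rw [hset]
          exact ih _ (g + 1)

lemma pv_loopD_succ (f : Nat) (d : List Int) (g : Int) (hz : ¬ d.all (fun x => x == 0) = true) :
    pvLoopD (f+1) d g = (if (g+1) % 2 == 1 then
        match pvScan (fun x => decide (x = 1 ∨ x ≥ 3)) d with
        | some j => pvLoopD f (d.set j (d.getD j 0 - 1)) (g+1)
        | none => pvLoopD f d (g+1)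
      else
        match pvScan (fun x => decide (x ≥ 2)) d with
        | some j => pvLoopD f (d.set j (d.getD j 0 - 2)) (g+1)
        | none => pvLoopD f d (g+1)) := by
  simp only [pvLoopD]
  rw [if_neg hz]

lemma pv_pass_cons (v : Int) (rest : List Int) (g : Int) (hv : v ≠ 0) :
    pvPassB (v :: rest) g =
      pvPassB (pvApplyEvent (if g % 2 = 0 then pvGensOdd v else pvGensEven v).2 rest)
        (g + (if g % 2 = 0 then pvGensOdd v else pvGensEven v).1) := by
  rw [pvPassB, if_neg (by simpa using hv)]
  have : (PySem.Int.mod g 2 == 0) = (decide (g % 2 = 0)) := by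
    rw [PySem.Int.mod_eq_emod_of_pos (by norm_num)]
    by_cases h : g % 2 = 0 <;> simp [h]
  rw [this]
  by_cases h : g % 2 = 0 <;> simp [h]

-- Phase 2: with enough fuel, the deficit-space loop equals B's one pass.
lemma pv_sim_pass : ∀ (n : Nat), ∀ (f : Nat) (d : List Int) (g : Int),
    f + d.length ≤ n → (∀ x ∈ d, 0 ≤ x) → 2 * d.sum ≤ (f : Int) →
    pvLoopD f d g = pvPassB d g := by
  intro n
  induction n with
  | zero =>
    intro f d g hn h0 hs
    have hf : f = 0 := by omega
    have hd : d = [] := by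
      cases d with
      | nil => rfl
      | cons x xs => simp at hn
    subst hf; subst hd
    simp [pvLoopD, pvPassB]
  | succ n ih =>
    intro f d g hn h0 hs
    by_cases hz : d.all (fun x => x == 0) = true
    · rw [pv_loopD_zeros _ _ _ hz,
        pv_pass_zeros d (fun x hx => by simpa using List.all_eq_true.mp hz x hx) g]
    · cases d with
      | nil => simp at hz
      | cons v rest =>
        have h0r : ∀ x ∈ rest, 0 ≤ x := fun x hx => h0 x (by simp [hx])
        have h0v : 0 ≤ v := h0 v (by simp)
        by_cases hv : v = 0
        · subst hv
          rw [pv_loopD_cons_zero, pvPassB, if_pos (by simp)]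
          exact ih f rest g (by simp only [List.length_cons] at hn; omega) h0r (by simpa using hs)
        · -- head v ≥ 1; some fuel available
          have hv1 : 1 ≤ v := by omega
          have hvsum : v ≤ (v :: rest).sum := List.single_le_sum h0 v (by simp)
          have hsr : 0 ≤ rest.sum := pv_sum_nonneg' rest h0r
          have hf2 : 2 ≤ f := by
            have : (2 : Int) ≤ 2 * (v :: rest).sum := by simp at hvsum ⊢; omega
            omega
          obtain ⟨f1, rfl⟩ : ∃ f1, f = f1 + 1 := ⟨f - 1, by omega⟩
          have hmeas1 : f1 + rest.length ≤ n := by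
            simp [List.length_cons] at hn; omega
          rw [pv_loopD_succ _ _ _ hz]
          rw [pv_pass_cons v rest g hv]
          by_cases hpar : g % 2 = 0
          · -- next generation is odd
            have hcond : ((g + 1) % 2 == 1) = true := by
              simp only [beq_iff_eq]; omega
            rw [if_pos hcond, if_pos hpar]
            by_cases hvone : v = 1
            · subst hvone
              have hscan : pvScan (fun x => decide (x = 1 ∨ x ≥ 3)) ((1:Int) :: rest) = some 0 := by
                rw [pv_scan_cons]; norm_num
              rw [hscan]
              simp only [pv_gens_odd_one, pvApplyEvent, List.set, List.getD_cons_zero]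
              norm_num
              rw [pv_loopD_cons_zero]
              exact ih f1 rest (g + 1) hmeas1 h0r (by simp at hs ⊢; omega)
            · by_cases hvtwo : v = 2
              · subst hvtwo
                have hscan : pvScan (fun x => decide (x = 1 ∨ x ≥ 3)) ((2:Int) :: rest)
                    = (pvScan (fun x => decide (x = 1 ∨ x ≥ 3)) rest).map (· + 1) := by
                  rw [pv_scan_cons]; norm_num
                rw [hscan]
                simp only [pv_gens_odd_two, pvApplyEvent]
                have hsum2 : 2 ≤ (2 + rest.sum : Int) := by omega
                have hf4 : 4 ≤ f1 + 1 := by simp at hs; omega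
                obtain ⟨f2, rfl⟩ : ∃ f2, f1 = f2 + 1 := ⟨f1 - 1, by omega⟩
                have hparity2 : ¬ (((g + 1 + 1) % 2 == 1) = true) := by
                  simp only [beq_iff_eq]; omega
                rw [pv_side_odd_scan]
                cases hsc : pvScan (fun x => decide (x = 1 ∨ x ≥ 3)) rest with
                | none =>
                  simp only [Option.map_none]
                  rw [pv_loopD_succ _ _ _ (by simp), if_neg hparity2]
                  have hscan2 : pvScan (fun x => decide (x ≥ 2)) ((2:Int) :: rest) = some 0 := by
                    rw [pv_scan_cons]; norm_num
                  rw [hscan2]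
                  simp only [List.set, List.getD_cons_zero]
                  norm_num
                  rw [pv_loopD_cons_zero]
                  rw [show g + 2 = g + 1 + 1 from by ring]
                  exact ih f2 rest (g + 1 + 1) (by omega) h0r (by simp at hs ⊢; omega)
                | some j =>
                  simp only [Option.map_some]
                  obtain ⟨hjlt, hpj⟩ := pv_scan_some _ _ _ hsc
                  have hpj' : rest[j] = 1 ∨ rest[j] ≥ 3 := by simpa using hpj
                  have hgetj : rest.getD j 0 = rest[j] := List.getD_eq_getElem _ _ hjlt
                  have hset : ((2:Int) :: rest).set (j+1) (((2:Int) :: rest).getD (j+1) 0 - 1)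
                      = (2:Int) :: rest.set j (rest.getD j 0 - 1) := by
                    simp [List.set, List.getD_cons_succ]
                  rw [hset]
                  rw [pv_loopD_succ _ _ _ (by simp), if_neg hparity2]
                  have hscan2 : pvScan (fun x => decide (x ≥ 2))
                      ((2:Int) :: rest.set j (rest.getD j 0 - 1)) = some 0 := by
                    rw [pv_scan_cons]; norm_num
                  rw [hscan2]
                  simp only [List.set, List.getD_cons_zero]
                  norm_num
                  rw [pv_loopD_cons_zero]
                  have h0' : ∀ x ∈ rest.set j (rest.getD j 0 - 1), 0 ≤ x := by
                    intro x hx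
                    rcases List.mem_or_eq_of_mem_set hx with h | rfl
                    · exact h0r x h
                    · rw [hgetj]; omega
                  have hsum' : (rest.set j (rest.getD j 0 - 1)).sum = rest.sum - 1 := by
                    rw [pv_sum_set_int rest j hjlt]; ring
                  simp only [← List.getD_eq_getElem?_getD]
                  rw [show g + 2 = g + 1 + 1 from by ring]
                  refine ih f2 _ (g + 1 + 1) (by simp only [List.length_set]; omega) h0' ?_
                  rw [hsum']; simp at hs; omega
              · have hv3 : 3 ≤ v := by omega
                have hscan : pvScan (fun x => decide (x = 1 ∨ x ≥ 3)) (v :: rest) = some 0 := by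
                  rw [pv_scan_cons, if_pos (by simp; omega)]
                rw [hscan]
                simp only [List.set, List.getD_cons_zero]
                have ihres := ih f1 ((v - 1) :: rest) (g + 1)
                  (by simp only [List.length_cons] at hn ⊢; omega)
                  (by
                    intro x hx
                    rcases List.mem_cons.mp hx with h | h
                    · rw [h]; omega
                    · exact h0r x h)
                  (by simp at hs ⊢; omega)
                rw [ihres]
                rw [pv_pass_cons (v - 1) rest (g + 1) (by omega)]
                have hpar1 : ¬ ((g + 1) % 2 = 0) := by omega
                rw [if_neg hpar1]
                simp only [pv_gens_odd_step v hv3]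
                congr 1
                ring
          · -- next generation is even
            have hcond : ¬ (((g + 1) % 2 == 1) = true) := by
              simp only [beq_iff_eq]; omega
            rw [if_neg hcond, if_neg hpar]
            by_cases hvone : v = 1
            · subst hvone
              have hscan : pvScan (fun x => decide (x ≥ 2)) ((1:Int) :: rest)
                  = (pvScan (fun x => decide (x ≥ 2)) rest).map (· + 1) := by
                rw [pv_scan_cons]; norm_num
              rw [hscan]
              simp only [pv_gens_even_one, pvApplyEvent]
              have hf4 : 2 ≤ f1 + 1 := by omega
              obtain ⟨f2, rfl⟩ : ∃ f2, f1 = f2 + 1 := by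
                have : 1 ≤ f1 := by
                  by_contra h
                  have hf1 : f1 = 0 := by omega
                  subst hf1
                  simp at hs
                  omega
                exact ⟨f1 - 1, by omega⟩
              have hparity2 : ((g + 1 + 1) % 2 == 1) = true := by
                simp only [beq_iff_eq]; omega
              rw [pv_side_even_scan]
              cases hsc : pvScan (fun x => decide (x ≥ 2)) rest with
              | none =>
                simp only [Option.map_none]
                rw [pv_loopD_succ _ _ _ (by simp), if_pos hparity2]
                have hscan2 : pvScan (fun x => decide (x = 1 ∨ x ≥ 3)) ((1:Int) :: rest) = some 0 := by
                  rw [pv_scan_cons]; norm_num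
                rw [hscan2]
                simp only [List.set, List.getD_cons_zero]
                norm_num
                rw [pv_loopD_cons_zero]
                rw [show g + 2 = g + 1 + 1 from by ring]
                exact ih f2 rest (g + 1 + 1) (by omega) h0r (by simp at hs ⊢; omega)
              | some j =>
                simp only [Option.map_some]
                obtain ⟨hjlt, hpj⟩ := pv_scan_some _ _ _ hsc
                have hpj' : rest[j] ≥ 2 := by simpa using hpj
                have hgetj : rest.getD j 0 = rest[j] := List.getD_eq_getElem _ _ hjlt
                have hset : ((1:Int) :: rest).set (j+1) (((1:Int) :: rest).getD (j+1) 0 - 2)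
                    = (1:Int) :: rest.set j (rest.getD j 0 - 2) := by
                  simp [List.set, List.getD_cons_succ]
                rw [hset]
                rw [pv_loopD_succ _ _ _ (by simp), if_pos hparity2]
                have hscan2 : pvScan (fun x => decide (x = 1 ∨ x ≥ 3))
                    ((1:Int) :: rest.set j (rest.getD j 0 - 2)) = some 0 := by
                  rw [pv_scan_cons]; norm_num
                rw [hscan2]
                simp only [List.set, List.getD_cons_zero]
                norm_num
                rw [pv_loopD_cons_zero]
                have h0' : ∀ x ∈ rest.set j (rest.getD j 0 - 2), 0 ≤ x := by
                  intro x hx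
                  rcases List.mem_or_eq_of_mem_set hx with h | rfl
                  · exact h0r x h
                  · rw [hgetj]; omega
                have hsum' : (rest.set j (rest.getD j 0 - 2)).sum = rest.sum - 2 := by
                  rw [pv_sum_set_int rest j hjlt]; ring
                simp only [← List.getD_eq_getElem?_getD]
                rw [show g + 2 = g + 1 + 1 from by ring]
                refine ih f2 _ (g + 1 + 1) (by simp only [List.length_set]; omega) h0' ?_
                rw [hsum']; simp at hs; omega
            · have hv2 : 2 ≤ v := by omega
              have hscan : pvScan (fun x => decide (x ≥ 2)) (v :: rest) = some 0 := by
                rw [pv_scan_cons, if_pos (by simp; omega)]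
              rw [hscan]
              simp only [List.set, List.getD_cons_zero]
              by_cases hvtwo : v = 2
              · subst hvtwo
                norm_num
                rw [pv_loopD_cons_zero]
                rw [pv_gens_even_two]
                simp only [pvApplyEvent]
                exact ih f1 rest (g + 1) hmeas1 h0r (by simp at hs ⊢; omega)
              · have hv3 : 3 ≤ v := by omega
                have ihres := ih f1 ((v - 2) :: rest) (g + 1)
                  (by simp only [List.length_cons] at hn ⊢; omega)
                  (by
                    intro x hx
                    rcases List.mem_cons.mp hx with h | h
                    · rw [h]; omega
                    · exact h0r x h)
                  (by simp at hs ⊢; omega)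
                rw [ihres]
                rw [pv_pass_cons (v - 2) rest (g + 1) (by omega)]
                have hpar1 : (g + 1) % 2 = 0 := by omega
                rw [if_pos hpar1]
                simp only [pv_gens_even_step v hv3]
                congr 1
                ring

-- ===== VERDICT (by name: the statement is the Claim_ definition above) =====
theorem findMinGeneration_spec : Claim_equal_findMinGeneration := by
  unfold Claim_equal_findMinGeneration Spec_findMinGeneration findMinGeneration findMinGeneration_alt
  intro layer _
  cases hq : PySem.List.max? (PySem.List.slice layer (some 1) none) (fun x => x) with
  | none =>
    have h0 : PySem.List.slice layer (some 1) none = [] :=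
      (PySem.List.max?_eq_none_iff _ _).mp hq
    rw [h0] at hq
    simp [h0, hq]
  | some m =>
    have hm : m ∈ PySem.List.slice layer (some 1) none := PySem.List.max?_mem hq
    have hne : PySem.List.slice layer (some 1) none ≠ [] := by
      intro h; rw [h] at hm; simp at hm
    have hb : ∀ x ∈ PySem.List.slice layer (some 1) none, x ≤ m :=
      fun x hx => PySem.List.max?_isMax hq x hx
    have hmax : (PySem.List.max? (PySem.List.slice layer (some 1) none) (fun x => x)).getD 0 = m := by
      rw [hq]; rfl
    simp only [hq, Option.getD_some]
    rw [if_neg (by simpa [List.length_eq_zero_iff] using hne)]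
    set L := PySem.List.slice layer (some 1) none with hL
    set d := L.map (fun x => m - x) with hd
    have h0 : ∀ x ∈ d, 0 ≤ x := by
      intro x hx
      obtain ⟨y, hy, rfl⟩ := List.mem_map.mp hx
      have := hb y hy; omega
    have hs0 : 0 ≤ d.sum := pv_sum_nonneg' d h0
    rw [pv_loop_AD m _ L 0 hb hm, ← hd]
    exact pv_sim_pass ((3 * d.sum + 3).toNat + d.length) _ d 0 le_rfl h0 (by omega)
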